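-- pv_equiv track=rewrite | github.com/ITNurse/garmin-activity-parkmap | src/app/enrich/match_parks.py | detect_name_field
-- ===== SOURCE A (Python) =====
-- NAME_FIELD_CANDIDATES = [
--     "PROTECTED_AREA_NAME_ENG",
--     "park_name",  "PARK_NAME",
--     "name",       "NAME",
--     "Name",
--     "NAME_E",     "name_e",
--     "LABEL",      "label",
--     "TITLE",      "title",
--     "SITE_NAME",  "site_name",
--     "PK_NAME",    "pk_name",
--     "FULLNAME",   "fullname",
--     "DESCRIPTIO", "description",
-- ]
--
-- def detect_name_field(features: list) -> str | None:
--     sample = features[:10]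
--     for candidate in NAME_FIELD_CANDIDATES:
--         for feat in sample:
--             val = (feat.get("properties") or {}).get(candidate)
--             if val and str(val).strip():
--                 return candidate
--     return None
-- ===== SOURCE B (Python) =====
-- NAME_FIELD_CANDIDATES = [
--     "PROTECTED_AREA_NAME_ENG",
--     "park_name",  "PARK_NAME",
--     "name",       "NAME",
--     "Name",
--     "NAME_E",     "name_e",
--     "LABEL",      "label",
--     "TITLE",      "title",
--     "SITE_NAME",  "site_name",
--     "PK_NAME",    "pk_name",
--     "FULLNAME",   "fullname",
--     "DESCRIPTIO", "description",
-- ]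
--
--
-- def detect_name_field(features: list) -> str | None:
--     # One pass over the <=10 sample features builds the set of keys that have a
--     # usable (non-blank) value somewhere; then a single priority scan over the
--     # candidate list picks the first qualifying candidate.
--     qualifying = set()
--     for feat in features[:10]:
--         props = feat.get("properties") or {}
--         for key in props:
--             val = props[key]
--             if val and str(val).strip():
--                 qualifying.add(key)
--     for candidate in NAME_FIELD_CANDIDATES:
--         if candidate in qualifying:
--             return candidate
--     return None
-- ===== Notes on version B (the rewrite author's own statement) =====
-- stated objective: alternative
-- what changed: Replaces A's nested candidate-by-sample rescanning with a single pass that builds a set of property keys having a non-blank value, followed by one priority scan over NAME_FIELD_CANDIDATES returning the first key present in the set.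
import Mathlib
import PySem

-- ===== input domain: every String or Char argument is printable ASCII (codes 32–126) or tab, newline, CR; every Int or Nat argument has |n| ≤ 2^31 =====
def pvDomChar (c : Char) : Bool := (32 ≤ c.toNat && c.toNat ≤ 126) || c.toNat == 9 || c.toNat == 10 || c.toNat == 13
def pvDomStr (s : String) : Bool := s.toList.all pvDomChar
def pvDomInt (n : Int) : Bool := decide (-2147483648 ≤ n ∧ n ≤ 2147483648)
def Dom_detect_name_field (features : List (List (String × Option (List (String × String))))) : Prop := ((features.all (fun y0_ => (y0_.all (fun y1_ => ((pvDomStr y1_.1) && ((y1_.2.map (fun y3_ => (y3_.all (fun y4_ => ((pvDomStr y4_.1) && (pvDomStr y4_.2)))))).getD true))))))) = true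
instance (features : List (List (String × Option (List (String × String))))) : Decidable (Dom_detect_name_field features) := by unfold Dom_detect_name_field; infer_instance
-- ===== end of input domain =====

-- B replaces A's nested candidate×sample rescan by one pass building the set of
-- keys with a usable value, followed by a single priority scan of the candidates
-- (objective: alternative decomposition; same observable behaviour).

-- shared transliteration of lines both Pythons contain verbatim:
-- the candidate list, `props = feat.get("properties") or {}`, and `val and str(val).strip()`
def pvCandidates : List String :=
  ["PROTECTED_AREA_NAME_ENG",
   "park_name",  "PARK_NAME",
   "name",       "NAME",
   "Name",
   "NAME_E",     "name_e",
   "LABEL",      "label",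
   "TITLE",      "title",
   "SITE_NAME",  "site_name",
   "PK_NAME",    "pk_name",
   "FULLNAME",   "fullname",
   "DESCRIPTIO", "description"]

def pvProps (feat : List (String × Option (List (String × String)))) : List (String × String) :=
  match (PySem.Dict.mk feat).get? "properties" with
  | some (some p) => p        -- an empty dict is falsy, but `{} or {}` is `{}` all the same
  | _ => []                   -- missing key or a None value → {}

def pvQual (val : String) : Bool := val != "" && PySem.Str.strip val != ""

-- ===== PORT A =====
-- `(feat.get("properties") or {}).get(candidate)` followed by the truthiness test
def pvCheckA (candidate : String) (feat : List (String × Option (List (String × String)))) : Bool :=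
  match (PySem.Dict.mk (pvProps feat)).get? candidate with
  | some val => pvQual val
  | none => false

-- `for candidate in NAME_FIELD_CANDIDATES: for feat in sample: … return candidate`
def pvLoopA (cands : List String) (sample : List (List (String × Option (List (String × String))))) : Option String :=
  match cands with
  | [] => none
  | c :: rest => if sample.any (pvCheckA c) then some c else pvLoopA rest sample

def detect_name_field (features : List (List (String × Option (List (String × String))))) : Option String :=
  pvLoopA pvCandidates (PySem.List.slice features none (some 10))

-- ===== PORT B =====
-- inner loop `for key in props: val = props[key]; if val and str(val).strip(): qualifying.add(key)`
-- (dict iteration = the distinct keys in insertion order; props[key] is get?, some by construction)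
def pvAddKeys (props : List (String × String)) (s : PySem.Set String) : PySem.Set String :=
  (PySem.Set.ofList ((PySem.Dict.mk props).keys)).foldl (fun s key =>
    match (PySem.Dict.mk props).get? key with
    | some val => if pvQual val then PySem.Set.add s key else s
    | none => s) s

def pvLoopB (cands : List String) (qualifying : PySem.Set String) : Option String :=
  match cands with
  | [] => none
  | c :: rest => if PySem.Set.contains qualifying c then some c else pvLoopB rest qualifying

def detect_name_field_alt (features : List (List (String × Option (List (String × String))))) : Option String :=
  let sample := PySem.List.slice features none (some 10)
  let qualifying := sample.foldl (fun s feat => pvAddKeys (pvProps feat) s) PySem.Set.empty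
  pvLoopB pvCandidates qualifying

-- ===== PRECONDITION & SPEC =====
def Spec_detect_name_field (features : List (List (String × Option (List (String × String))))) (out : Option String) : Prop := out = detect_name_field_alt features
instance (features : List (List (String × Option (List (String × String))))) (out : Option String) : Decidable (Spec_detect_name_field features out) := by unfold Spec_detect_name_field; infer_instance

-- ===== CLAIM (what is proved, stated in full; the proofs are below) =====
def Claim_equal_detect_name_field : Prop := ∀ (features : List (List (String × Option (List (String × String))))), Dom_detect_name_field features → Spec_detect_name_field features (detect_name_field features)

-- ===== LEMMAS AND PROOFS =====

-- membership after the inner fold over any key list: c got added iff it occurs and its first-match value qualifies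
lemma pvStep_mem (props : List (String × String)) (l : List String) (s : PySem.Set String) (c : String) :
    c ∈ l.foldl (fun s key =>
      match (PySem.Dict.mk props).get? key with
      | some val => if pvQual val then PySem.Set.add s key else s
      | none => s) s ↔
      c ∈ s ∨ (c ∈ l ∧ (match (PySem.Dict.mk props).get? c with
        | some val => pvQual val | none => false) = true) := by
  induction l generalizing s with
  | nil => simp
  | cons x xs ih =>
    rw [List.foldl_cons, ih]
    by_cases hx : c = x
    · subst hx
      cases h : (PySem.Dict.mk props).get? c
      · simp
      · simp only []
        split_ifs with hq <;> simp [PySem.Set.mem_add, hq]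
    · have hst : (c ∈ (match (PySem.Dict.mk props).get? x with
        | some val => if pvQual val then PySem.Set.add s x else s
        | none => s)) ↔ c ∈ s := by
        cases h : (PySem.Dict.mk props).get? x
        · simp
        · simp only []
          split_ifs <;> simp [PySem.Set.mem_add, hx]
      rw [hst]
      constructor
      · rintro (h | ⟨h1, h2⟩)
        · exact Or.inl h
        · exact Or.inr ⟨List.mem_cons_of_mem _ h1, h2⟩
      · rintro (h | ⟨h1, h2⟩)
        · exact Or.inl h
        · rcases List.mem_cons.mp h1 with h1 | h1
          · exact absurd h1 hx
          · exact Or.inr ⟨h1, h2⟩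

lemma pvAddKeys_mem (props : List (String × String)) (s : PySem.Set String) (c : String) :
    c ∈ pvAddKeys props s ↔ c ∈ s ∨ (match (PySem.Dict.mk props).get? c with
      | some val => pvQual val | none => false) = true := by
  unfold pvAddKeys
  rw [pvStep_mem]
  cases h : (PySem.Dict.mk props).get? c
  · simp only []
    simp
  · have hk : c ∈ PySem.Set.ofList ((PySem.Dict.mk props).keys) := by
      rw [PySem.Set.mem_ofList]
      by_contra hn
      rw [← PySem.Dict.get?_eq_none_iff_not_mem_keys] at hn
      simp [h] at hn
    simp only []
    constructor
    · rintro (hs | ⟨_, hq⟩)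
      exacts [Or.inl hs, Or.inr hq]
    · rintro (hs | hq)
      exacts [Or.inl hs, Or.inr ⟨hk, hq⟩]

lemma pvFold_mem (sample : List (List (String × Option (List (String × String)))))
    (s : PySem.Set String) (c : String) :
    c ∈ sample.foldl (fun s feat => pvAddKeys (pvProps feat) s) s ↔
      c ∈ s ∨ ∃ feat ∈ sample, pvCheckA c feat = true := by
  induction sample generalizing s with
  | nil => simp
  | cons f fs ih =>
    rw [List.foldl_cons, ih, pvAddKeys_mem]
    have : (match (PySem.Dict.mk (pvProps f)).get? c with
        | some val => pvQual val | none => false) = pvCheckA c f := rfl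
    rw [this]
    constructor
    · rintro ((h | h) | ⟨g, hg, h⟩)
      · exact Or.inl h
      · exact Or.inr ⟨f, List.mem_cons_self, h⟩
      · exact Or.inr ⟨g, List.mem_cons_of_mem _ hg, h⟩
    · rintro (h | ⟨g, hg, h⟩)
      · exact Or.inl (Or.inl h)
      · rcases List.mem_cons.mp hg with rfl | hg
        · exact Or.inl (Or.inr h)
        · exact Or.inr ⟨g, hg, h⟩

lemma pvLoop_eq (sample : List (List (String × Option (List (String × String)))))
    (q : PySem.Set String)
    (h : ∀ c, c ∈ q ↔ ∃ feat ∈ sample, pvCheckA c feat = true) (cands : List String) :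
    pvLoopA cands sample = pvLoopB cands q := by
  induction cands with
  | nil => rfl
  | cons c rest ih => simp [pvLoopA, pvLoopB, h, ih]

-- ===== VERDICT (by name: the statement is the Claim_ definition above) =====
theorem detect_name_field_spec : Claim_equal_detect_name_field := by
  intro features _
  unfold Spec_detect_name_field detect_name_field detect_name_field_alt
  apply pvLoop_eq
  intro c
  rw [pvFold_mem]
  simp [PySem.Set.empty]
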